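-- pv_equiv track=rewrite | github.com/irena-flextool/flextool | flextool/flextoolrunner/solve_writers.py | get_first_steps
-- ===== SOURCE A (Python) =====
-- from typing import Any
--
-- def get_first_steps(
--     steplists: dict[str, list[Any]],
-- ) -> dict[str, tuple[Any, ...]]:
--     """Get the first step of the current solve and the next solve in execution order."""
--     solve_names = list(steplists.keys())
--     starts: dict[str, tuple[Any, ...]] = dict()
--     for index, name in enumerate(solve_names):
--         if index == (len(solve_names) - 1):
--             starts[name] = (steplists[name][0],)
--         else:
--             starts[name] = (steplists[solve_names[index]][0], steplists[solve_names[index + 1]][0])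
--     return starts
-- ===== SOURCE B (Python) =====
-- def get_first_steps(steplists):
--     """Get the first step of the current solve and the next solve in execution order."""
--     rev = []
--     nxt = None
--     for name, steps in reversed(list(steplists.items())):
--         first = steps[0]
--         rev.append((name, (first,) if nxt is None else (first, nxt)))
--         nxt = first
--     return dict(reversed(rev))
-- ===== Notes on version B (the rewrite author's own statement) =====
-- stated objective: alternative
-- what changed: Replaces A's forward index loop (enumerate over the key list with a last-index guard and dict lookups for the current and next keys) by a single reverse pass over the item list that carries the next solve's first step in an accumulator, then reverses the collected pairs back into a dict; no index arithmetic or key lookups remain.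
import Mathlib
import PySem

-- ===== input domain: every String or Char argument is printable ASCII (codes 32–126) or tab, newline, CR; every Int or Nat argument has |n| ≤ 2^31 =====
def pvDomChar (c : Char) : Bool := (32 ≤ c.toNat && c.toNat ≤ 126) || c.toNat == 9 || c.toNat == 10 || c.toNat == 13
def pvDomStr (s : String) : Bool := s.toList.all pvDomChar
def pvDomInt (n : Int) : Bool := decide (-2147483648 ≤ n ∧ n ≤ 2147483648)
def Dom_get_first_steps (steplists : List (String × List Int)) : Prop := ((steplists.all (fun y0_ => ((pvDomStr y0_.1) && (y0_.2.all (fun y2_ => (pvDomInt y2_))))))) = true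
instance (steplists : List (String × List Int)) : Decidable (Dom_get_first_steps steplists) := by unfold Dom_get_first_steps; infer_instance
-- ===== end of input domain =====

-- B replaces A's index loop with dict lookups by a single reverse pass over the item list carrying the next solve's first step in an accumulator; objective: alternative.


-- ===== PORT A =====
-- steplists[m][0], as A writes it (pyGetD default unreachable inside Pre_)
def pvFirstA (d : PySem.Dict String (List Int)) (m : String) : Int :=
  PySem.List.pyGetD (d.getD m []) 0 0

def get_first_steps (steplists : List (String × List Int)) : List (String × List Int) :=
  let d : PySem.Dict String (List Int) := PySem.Dict.mk steplists
  let solve_names := d.keys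
  let starts : PySem.Dict String (List Int) :=
    (PySem.List.enumerate solve_names 0).foldl
      (fun st p =>
        if p.1 = (solve_names.length : Int) - 1 then
          st.insert p.2 [pvFirstA d p.2]
        else
          st.insert p.2 [pvFirstA d (PySem.List.pyGetD solve_names p.1 ""),
                         pvFirstA d (PySem.List.pyGetD solve_names (p.1 + 1) "")])
      PySem.Dict.empty
  starts.items

-- ===== PORT B =====
-- single loop of Source B over reversed(items), carrying (rev, nxt); dict(reversed(rev)) at the end
def get_first_steps_alt (steplists : List (String × List Int)) : List (String × List Int) :=
  let res := ((PySem.Dict.mk steplists).items.reverse).foldl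
      (fun (acc : List (String × List Int) × Option Int) p =>
        let first := PySem.List.pyGetD p.2 0 0
        (acc.1 ++ [(p.1, match acc.2 with | none => [first] | some v => [first, v])], some first))
      ([], none)
  (PySem.Dict.ofList res.1.reverse).items

-- ===== PRECONDITION & SPEC =====
-- Pre_ excludes (a) association lists with duplicate keys, which cannot arise from A's
-- Python dict argument, and (b) inputs with an empty step list, on which A (and B) raise IndexError.
def Pre_get_first_steps (steplists : List (String × List Int)) : Prop :=
  (steplists.map (·.1)).Nodup ∧ ∀ p ∈ steplists, p.2 ≠ []
instance (steplists : List (String × List Int)) : Decidable (Pre_get_first_steps steplists) := by unfold Pre_get_first_steps; infer_instance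
def pvWitness_get_first_steps : (List (String × List Int)) := [("a", [1, 2]), ("b", [3])]
def Spec_get_first_steps (steplists : List (String × List Int)) (out : List (String × List Int)) : Prop := out = get_first_steps_alt steplists
instance (steplists : List (String × List Int)) (out : List (String × List Int)) : Decidable (Spec_get_first_steps steplists out) := by unfold Spec_get_first_steps; infer_instance

-- ===== CLAIM (what is proved, stated in full; the proofs are below) =====
def Claim_equal_get_first_steps : Prop := ∀ (steplists : List (String × List Int)), Dom_get_first_steps steplists → Pre_get_first_steps steplists → Spec_get_first_steps steplists (get_first_steps steplists)

-- ===== LEMMAS AND PROOFS =====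

-- pvPairB: forward-order characterisation of both programs' result, used only by the proofs
def pvPairB : List (String × List Int) → List (String × List Int)
  | [] => []
  | [(name, steps)] => [(name, [PySem.List.pyGetD steps 0 0])]
  | (name, steps) :: nxt :: rest =>
      (name, [PySem.List.pyGetD steps 0 0, PySem.List.pyGetD nxt.2 0 0]) :: pvPairB (nxt :: rest)

lemma pvFold_inv (l : List (String × List Int)) :
    l.reverse.foldl
      (fun (acc : List (String × List Int) × Option Int) p =>
        let first := PySem.List.pyGetD p.2 0 0
        (acc.1 ++ [(p.1, match acc.2 with | none => [first] | some v => [first, v])], some first))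
      ([], none)
    = ((pvPairB l).reverse, l.head?.map (fun p => PySem.List.pyGetD p.2 0 0)) := by
  induction l with
  | nil => rfl
  | cons x l ih =>
    obtain ⟨xn, xs⟩ := x
    rw [List.reverse_cons, List.foldl_append, ih]
    cases l with
    | nil => rfl
    | cons y r =>
      obtain ⟨yn, ys⟩ := y
      simp [pvPairB]

lemma pvPairB_fst (l : List (String × List Int)) :
    (pvPairB l).map (·.1) = l.map (·.1) := by
  induction l with
  | nil => rfl
  | cons a rest ih =>
    obtain ⟨name, steps⟩ := a
    cases rest with
    | nil => rfl
    | cons b r2 =>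
      obtain ⟨n2, s2⟩ := b
      simpa [pvPairB] using ih

lemma pvPairB_length (l : List (String × List Int)) :
    (pvPairB l).length = l.length := by
  have := congrArg List.length (pvPairB_fst l)
  simpa using this

lemma items_ofList_nodup (l : List (String × List Int)) (h : (l.map (·.1)).Nodup) :
    (PySem.Dict.ofList l).items = l := by
  unfold PySem.Dict.ofList PySem.Dict.update
  rw [PySem.Dict.items_foldl_insert_fresh l (·.1) (·.2) PySem.Dict.empty (by intro a _; simp) h]
  have hemp : (PySem.Dict.empty : PySem.Dict String (List Int)).items = [] := rfl
  simp [hemp]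

lemma pvPairB_getElem (l : List (String × List Int)) (k : Nat) (hk : k < l.length) :
    (pvPairB l)[k]'((pvPairB_length l) ▸ hk)
      = ((l[k]'hk).1,
         if k = l.length - 1 then [PySem.List.pyGetD (l[k]'hk).2 0 0]
         else [PySem.List.pyGetD (l[k]'hk).2 0 0,
               PySem.List.pyGetD (l.getD (k + 1) ("", [])).2 0 0]) := by
  induction l generalizing k with
  | nil => simp at hk
  | cons a rest ih =>
    obtain ⟨name, steps⟩ := a
    cases rest with
    | nil =>
      have hk0 : k = 0 := by simp at hk; omega
      subst hk0
      simp [pvPairB]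
    | cons b r2 =>
      obtain ⟨n2, s2⟩ := b
      cases k with
      | zero => simp [pvPairB]
      | succ j =>
        have hj : j < ((n2, s2) :: r2).length := by simpa using hk
        simp only [pvPairB, List.getElem_cons_succ, List.getD_cons_succ]
        rw [ih j hj]
        have hcond : (j + 1 = ((name, steps) :: (n2, s2) :: r2).length - 1)
            ↔ (j = ((n2, s2) :: r2).length - 1) := by
          simp only [List.length_cons]; omega
        by_cases hc : j = ((n2, s2) :: r2).length - 1
        · rw [if_pos hc, if_pos (hcond.mpr hc)]
        · rw [if_neg hc, if_neg (fun h => hc (hcond.mp h)), List.getD_cons_succ]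

lemma pv_main (l : List (String × List Int)) (hnd : (l.map (·.1)).Nodup) :
    get_first_steps l = pvPairB l := by
  unfold get_first_steps
  simp only []
  set d := PySem.Dict.mk l with hd
  have hkeys : d.keys = l.map (·.1) := PySem.Dict.keys_mk l
  set names := d.keys with hnames
  have hnlen : names.length = l.length := by rw [hkeys]; simp
  have hndn : names.Nodup := by rw [hkeys]; exact hnd
  -- flatten A's loop over fresh distinct keys
  have hA1 : (fun (st : PySem.Dict String (List Int)) (p : Int × String) =>
        if p.1 = (names.length : Int) - 1 then st.insert p.2 [pvFirstA d p.2]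
        else st.insert p.2 [pvFirstA d (PySem.List.pyGetD names p.1 ""),
                            pvFirstA d (PySem.List.pyGetD names (p.1 + 1) "")])
      = (fun st p => st.insert p.2
          (if p.1 = (names.length : Int) - 1 then [pvFirstA d p.2]
           else [pvFirstA d (PySem.List.pyGetD names p.1 ""),
                 pvFirstA d (PySem.List.pyGetD names (p.1 + 1) "")])) := by
    funext st p; split <;> rfl
  rw [hA1, PySem.Dict.items_foldl_insert_fresh (PySem.List.enumerate names 0) (fun p => p.2) _ PySem.Dict.empty
      (by intro a _; simp)
      (by rw [PySem.List.map_snd_enumerate]; exact hndn)]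
  have hemp : (PySem.Dict.empty : PySem.Dict String (List Int)).items = [] := rfl
  rw [hemp, List.nil_append, PySem.List.enumerate_eq_map_pyRange names "", List.map_map]
  -- the name and the first step at an index, read through the dict
  have hnth : ∀ (j : Nat) (hj : j < l.length),
      PySem.List.pyGetD names (j : Int) "" = (l[j]'hj).1 := by
    intro j hj
    rw [PySem.List.pyGetD_eq_getElem names "" (by positivity) (by rw [hnlen]; exact_mod_cast hj)]
    simp only [hkeys]
    simp
  have hfst : ∀ (j : Nat) (hj : j < l.length),
      pvFirstA d ((l[j]'hj).1) = PySem.List.pyGetD ((l[j]'hj).2) 0 0 := by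
    intro j hj
    unfold pvFirstA
    congr 1
    have hmem : ((l[j]'hj).1, (l[j]'hj).2) ∈ d.items := by
      simp [hd]
    exact PySem.Dict.getD_of_mem_items d hmem hndn []
  -- elementwise comparison with pvPairB
  apply List.ext_getElem
  · simp [PySem.List.len, pvPairB_length, PySem.List.length_pyRange_one, hnlen]
  intro k h1 h2
  have hkl : k < l.length := by rw [pvPairB_length] at h2; exact h2
  rw [pvPairB_getElem l k hkl, List.getElem_map, PySem.List.getElem_pyRange_one]
  simp only [Function.comp_apply, zero_add]
  by_cases hc : k = l.length - 1
  · have hci : ((k : Nat) : Int) = (names.length : Int) - 1 := by omega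
    rw [if_pos hci, if_pos hc, hnth k hkl, hfst k hkl]
  · have hci : ¬ (((k : Nat) : Int) = (names.length : Int) - 1) := by omega
    rw [if_neg hci, if_neg hc, hnth k hkl, hfst k hkl]
    have hk1 : k + 1 < l.length := by omega
    have h2c : ((k : Nat) : Int) + 1 = (((k + 1 : Nat)) : Int) := by push_cast; ring
    rw [h2c, hnth (k + 1) hk1, hfst (k + 1) hk1, List.getD_eq_getElem l ("", []) hk1]

-- ===== VERDICT (by name: the statement is the Claim_ definition above) =====
theorem get_first_steps_spec : Claim_equal_get_first_steps := by
  intro steplists _ hpre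
  unfold Spec_get_first_steps
  unfold get_first_steps_alt
  simp only []
  rw [show (PySem.Dict.mk steplists).items.reverse = steplists.reverse from rfl,
      pvFold_inv steplists]
  simp only [List.reverse_reverse]
  rw [items_ofList_nodup _ (by rw [pvPairB_fst]; exact hpre.1)]
  exact pv_main steplists hpre.1
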